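-- pv_equiv track=rewrite | github.com/dcunhrya/VLMEvalKit | vlmeval/dataset/microbench.py | _parse_letter
-- ===== SOURCE A (Python) =====
-- import json, re, string, unicodedata
-- import string
--
-- def _letters(n: int):
--     assert 1 <= n <= 26, "This template supports up to 26 options."
--     return list(string.ascii_uppercase[:n])  # ['A', ... 'Z'][:n]
--
-- def _parse_letter(text: str, num_opts: int) -> str:
--     """Strict A..(A+num_opts-1) parser; returns 'INVALID' if no single-letter answer is found."""
--     if not isinstance(text, str):
--         return "INVALID"
--     t = text.strip().upper()
--     valid = set(_letters(num_opts))
--     if len(t) == 1 and t in valid: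
--         return t
--     # tolerate explanations like "Answer: H ..."
--     for ch in reversed(t):
--         if ch in valid:
--             return ch
--     return "INVALID"
-- ===== SOURCE B (Python) =====
-- import re, string
--
-- def _letters(n: int):
--     assert 1 <= n <= 26, "This template supports up to 26 options."
--     return list(string.ascii_uppercase[:n])
--
-- def _parse_letter(text: str, num_opts: int) -> str:
--     """Strict A..(A+num_opts-1) parser; returns 'INVALID' if no single-letter answer is found."""
--     if not isinstance(text, str):
--         return "INVALID"
--     _letters(num_opts)  # validate num_opts (same AssertionError as before)
--     t = text.strip().upper()
--     last = chr(ord('A') + num_opts - 1)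
--     matches = re.findall(f"[A-{last}]", t)
--     return matches[-1] if matches else "INVALID"
-- ===== Notes on version B (the rewrite author's own statement) =====
-- stated objective: idiomatic
-- what changed: Replaces the single-char guard plus explicit reversed membership-in-set loop with one regex findall over the char range [A-last] (last computed arithmetically from num_opts), returning the last match or 'INVALID'.
import Mathlib
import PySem

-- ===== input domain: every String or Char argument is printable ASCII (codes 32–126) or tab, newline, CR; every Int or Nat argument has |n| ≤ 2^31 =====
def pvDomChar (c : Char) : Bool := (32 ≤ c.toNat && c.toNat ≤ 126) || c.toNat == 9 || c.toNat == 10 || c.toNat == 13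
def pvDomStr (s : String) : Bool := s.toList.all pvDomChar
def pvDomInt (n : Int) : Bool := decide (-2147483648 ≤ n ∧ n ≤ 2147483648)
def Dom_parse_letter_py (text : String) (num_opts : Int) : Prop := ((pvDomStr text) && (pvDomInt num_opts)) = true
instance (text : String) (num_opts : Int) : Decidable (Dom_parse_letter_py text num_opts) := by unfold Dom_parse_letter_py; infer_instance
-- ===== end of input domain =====

-- B replaces A's single-char guard plus reversed membership loop by one regex-style
-- range scan ([A-last]) taking the last match — more idiomatic, same O(n) cost.

-- ===== PORT A =====
-- _letters(n): list(string.ascii_uppercase[:n]); the 1 <= n <= 26 assert is Pre_'s to exclude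
def lettersA (n : Int) : List Char :=
  (PySem.List.slice "ABCDEFGHIJKLMNOPQRSTUVWXYZ".toList none (some n))

def parse_letter_py (text : String) (num_opts : Int) : String :=
  -- isinstance(text, str) is always true under the type convention
  let t := PySem.Str.upper (PySem.Str.strip text)
  let valid : PySem.Set String :=
    PySem.Set.ofList ((lettersA num_opts).map (fun c => String.ofList [c]))
  if PySem.Str.len t = 1 ∧ PySem.Set.contains valid t = true then t
  else
    -- for ch in reversed(t): if ch in valid: return ch
    match t.toList.reverse.find? (fun ch => PySem.Set.contains valid (String.ofList [ch])) with
    | some ch => String.ofList [ch]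
    | none => "INVALID"

-- ===== PORT B =====
def parse_letter_py_alt (text : String) (num_opts : Int) : String :=
  -- isinstance(text, str) is always true under the type convention; _letters' assert is Pre_'s
  let t := PySem.Str.upper (PySem.Str.strip text)
  let last := Char.ofNat (65 + (num_opts - 1).toNat)   -- chr(ord('A') + num_opts - 1)
  -- re.findall(f"[A-{last}]", t): the chars of t in the range, in order
  let hits := t.toList.filter (fun c => decide ('A' ≤ c ∧ c ≤ last))
  match hits.getLast? with   -- matches[-1] if matches else "INVALID"
  | some c => String.ofList [c]
  | none => "INVALID"

-- ===== PRECONDITION & SPEC =====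
-- A's _letters asserts 1 <= num_opts <= 26 (AssertionError otherwise); exactly those inputs are excluded.
def Pre_parse_letter_py (text : String) (num_opts : Int) : Prop :=
  1 ≤ num_opts ∧ num_opts ≤ 26
instance (text : String) (num_opts : Int) : Decidable (Pre_parse_letter_py text num_opts) := by
  unfold Pre_parse_letter_py; infer_instance

def pvWitness_parse_letter_py : String × Int := ("Answer: B", 4)

def Spec_parse_letter_py (text : String) (num_opts : Int) (out : String) : Prop := out = parse_letter_py_alt text num_opts
instance (text : String) (num_opts : Int) (out : String) : Decidable (Spec_parse_letter_py text num_opts out) := by unfold Spec_parse_letter_py; infer_instance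

-- ===== CLAIM (what is proved, stated in full; the proofs are below) =====
def Claim_equal_parse_letter_py : Prop := ∀ (text : String) (num_opts : Int), Dom_parse_letter_py text num_opts → Pre_parse_letter_py text num_opts → Spec_parse_letter_py text num_opts (parse_letter_py text num_opts)

-- ===== LEMMAS AND PROOFS =====

theorem toNat_ofNat_small (m : Nat) (h : m < 55296) : (Char.ofNat m).toNat = m := by
  unfold Char.ofNat
  rw [dif_pos (Or.inl h)]
  simp [Char.ofNatAux, Char.toNat]

theorem uppercase_eq : "ABCDEFGHIJKLMNOPQRSTUVWXYZ".toList
    = (List.range 26).map (fun i => Char.ofNat (65 + i)) := by decide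

-- membership in the first k uppercase letters is the range test 'A' ≤ c ≤ chr(64+k)
theorem mem_letters_iff (k : Nat) (hk1 : 1 ≤ k) (hk2 : k ≤ 26) (c : Char) :
    c ∈ "ABCDEFGHIJKLMNOPQRSTUVWXYZ".toList.take k
      ↔ ('A' ≤ c ∧ c ≤ Char.ofNat (64 + k)) := by
  rw [uppercase_eq, ← List.map_take, List.take_range, min_eq_left hk2]
  have hlast : (Char.ofNat (64 + k)).toNat = 64 + k := toNat_ofNat_small _ (by omega)
  constructor
  · rintro hc
    rcases List.mem_map.mp hc with ⟨i, hi, rfl⟩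
    rw [List.mem_range] at hi
    have := toNat_ofNat_small (65 + i) (by omega)
    have hA : ('A').toNat = 65 := rfl
    constructor
    · show (('A').toNat ≤ (Char.ofNat (65 + i)).toNat)
      rw [this, hA]; omega
    · show ((Char.ofNat (65 + i)).toNat ≤ (Char.ofNat (64 + k)).toNat)
      rw [this, hlast]; omega
  · rintro ⟨h1, h2⟩
    have h1' : 65 ≤ c.toNat := h1
    have h2' : c.toNat ≤ 64 + k := by
      have : c.toNat ≤ (Char.ofNat (64 + k)).toNat := h2
      omega
    refine List.mem_map.mpr ⟨c.toNat - 65, List.mem_range.mpr (by omega), ?_⟩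
    have : 65 + (c.toNat - 65) = c.toNat := by omega
    rw [this, Char.ofNat_toNat]

-- A's set-membership test on the 1-char string equals B's range test, as Bools
theorem pred_eq (n : Int) (h1 : 1 ≤ n) (h2 : n ≤ 26) (c : Char) :
    PySem.Set.contains
        (PySem.Set.ofList ((lettersA n).map (fun c => String.ofList [c])))
        (String.ofList [c])
      = decide ('A' ≤ c ∧ c ≤ Char.ofNat (65 + (n - 1).toNat)) := by
  have hk : 65 + (n - 1).toNat = 64 + n.toNat := by omega
  have hmem : (PySem.Set.contains
      (PySem.Set.ofList ((lettersA n).map (fun c => String.ofList [c])))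
      (String.ofList [c]) = true) ↔ ('A' ≤ c ∧ c ≤ Char.ofNat (64 + n.toNat)) := by
    have hslice : lettersA n = "ABCDEFGHIJKLMNOPQRSTUVWXYZ".toList.take n.toNat :=
      PySem.List.slice_to _ (by omega)
    rw [hslice, PySem.Set.contains_iff, PySem.Set.mem_ofList, List.mem_map]
    constructor
    · rintro ⟨a, ha, haeq⟩
      have hac : a = c := by
        have := String.ofList_inj.mp haeq; simpa using this
      exact (mem_letters_iff n.toNat (by omega) (by omega) c).mp (hac ▸ ha)
    · intro h
      exact ⟨c, (mem_letters_iff n.toNat (by omega) (by omega) c).mpr h, rfl⟩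
  rw [hk]
  exact Bool.eq_iff_iff.mpr (by rw [decide_eq_true_eq]; exact hmem)

-- ===== VERDICT (by name: the statement is the Claim_ definition above) =====
theorem parse_letter_py_spec : Claim_equal_parse_letter_py := by
  intro text n hdom hpre
  obtain ⟨h1, h2⟩ := hpre
  unfold Spec_parse_letter_py parse_letter_py parse_letter_py_alt
  simp only []
  set t := PySem.Str.upper (PySem.Str.strip text) with ht
  set L := t.toList with hL
  set p := fun ch => PySem.Set.contains
      (PySem.Set.ofList ((lettersA n).map (fun c => String.ofList [c])))
      (String.ofList [ch]) with hp
  set q := fun c => decide ('A' ≤ c ∧ c ≤ Char.ofNat (65 + (n - 1).toNat)) with hq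
  have hpq : ∀ c, p c = q c := fun c => pred_eq n h1 h2 c
  have hfilter : L.filter p = L.filter q := List.filter_congr (fun c _ => hpq c)
  have hfind : L.reverse.find? p = (L.filter q).getLast? := by
    rw [(List.head?_filter).symm, List.filter_reverse, List.head?_reverse, hfilter]
  split_ifs with h
  · obtain ⟨hlen, hmem⟩ := h
    rw [PySem.Str.len_eq] at hlen
    obtain ⟨c, hc⟩ := List.length_eq_one_iff.mp (by omega : t.toList.length = 1)
    have htc : t = String.ofList [c] := by rw [← hc, String.ofList_toList]
    have hqc : q c = true := by rw [← hpq]; rw [htc] at hmem; exact hmem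
    have : L.filter q = [c] := by
      rw [← hL] at hc; rw [hc]; simp [hqc]
    rw [this]
    simp [htc]
  · rw [hfind]
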